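-- pv_equiv track=rewrite | github.com/vishantgawali1811/KavachX-1 | backend/feature_extraction.py | _char_repeat
-- ===== SOURCE A (Python) =====
-- def _char_repeat(words: list) -> int:
--     def all_same(items):
--         return all(x == items[0] for x in items)
--
--     repeat = {2: 0, 3: 0, 4: 0, 5: 0}
--     for word in words:
--         for n in (2, 3, 4, 5):
--             for i in range(len(word) - n + 1):
--                 if all_same(word[i: i + n]):
--                     repeat[n] += 1
--     return sum(repeat.values())
-- ===== SOURCE B (Python) =====
-- def _char_repeat(words: list) -> int:
--     # One pass per word: run-length encode; a run of length r contributes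
--     # (r - n + 1) windows for each window size n in 2..5 with n <= r.
--     total = 0
--     for word in words:
--         L = len(word)
--         i = 0
--         while i < L:
--             j = i + 1
--             while j < L and word[j] == word[i]:
--                 j += 1
--             r = j - i
--             for n in (2, 3, 4, 5):
--                 if r >= n:
--                     total += r - n + 1
--             i = j
--     return total
-- ===== Notes on version B (the rewrite author's own statement) =====
-- stated objective: faster
-- what changed: A slides 14 overlapping windows (sizes 2..5, each rescanned element-wise) over every word and counts them in a dict; B run-length encodes each word in a single pass and adds the closed-form window count max(0, r - n + 1) per run of length r.
import Mathlib
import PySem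

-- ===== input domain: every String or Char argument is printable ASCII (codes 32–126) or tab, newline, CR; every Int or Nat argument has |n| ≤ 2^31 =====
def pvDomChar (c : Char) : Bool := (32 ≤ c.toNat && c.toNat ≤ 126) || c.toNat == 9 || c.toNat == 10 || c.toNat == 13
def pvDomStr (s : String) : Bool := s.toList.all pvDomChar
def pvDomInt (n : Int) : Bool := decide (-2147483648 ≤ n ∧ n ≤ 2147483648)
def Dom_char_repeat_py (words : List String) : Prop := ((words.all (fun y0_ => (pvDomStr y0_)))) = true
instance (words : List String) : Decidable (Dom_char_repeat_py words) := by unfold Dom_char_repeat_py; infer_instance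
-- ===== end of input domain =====

-- B replaces A's 14 overlapping window scans per word by a single run-length pass (constant-factor speed-up).

-- ===== PORT A =====
-- all(x == items[0] for x in items); on an empty slice the generator is empty, so
-- items[0] is never evaluated and the result is True (pyGet? [] 0 = none matches nothing, all [] = true).
def pvAllSame (items : List Char) : Bool :=
  items.all (fun x => PySem.List.pyGet? items 0 == some x)

def char_repeat_py (words : List String) : Int :=
  let rep0 : PySem.Dict Int Int := PySem.Dict.ofList [(2, 0), (3, 0), (4, 0), (5, 0)]
  let rep := words.foldl (fun rep word =>
    ([2, 3, 4, 5] : List Int).foldl (fun rep n =>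
      (PySem.List.pyRange 0 (PySem.Str.len word - n + 1) 1).foldl (fun rep i =>
        if pvAllSame (PySem.List.slice word.toList (some i) (some (i + n))) then
          rep.modify n 0 (· + 1)   -- repeat[n] += 1 (key n is always present)
        else rep) rep) rep) rep0
  rep.values.sum

-- ===== PORT B =====
-- for n in (2,3,4,5): if r >= n: total += r - n + 1
def pvRunContrib (r : Int) : Int :=
  ([2, 3, 4, 5] : List Int).foldl (fun t n => if r ≥ n then t + (r - n + 1) else t) 0

-- the two while loops: peel one maximal run of equal leading characters at a time
def pvRunSum : List Char → Int
  | [] => 0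
  | c :: rest =>
    pvRunContrib (1 + (rest.takeWhile (· == c)).length) + pvRunSum (rest.dropWhile (· == c))
  termination_by s => s.length
  decreasing_by
    simp only [List.length_cons]
    have := List.length_dropWhile_le (· == c) rest
    omega

def char_repeat_py_alt (words : List String) : Int :=
  words.foldl (fun total word => total + pvRunSum word.toList) 0

-- ===== PRECONDITION & SPEC =====
def Spec_char_repeat_py (words : List String) (out : Int) : Prop := out = char_repeat_py_alt words
instance (words : List String) (out : Int) : Decidable (Spec_char_repeat_py words out) := by unfold Spec_char_repeat_py; infer_instance

-- ===== CLAIM (what is proved, stated in full; the proofs are below) =====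
def Claim_equal_char_repeat_py : Prop := ∀ (words : List String), Dom_char_repeat_py words → Spec_char_repeat_py words (char_repeat_py words)


-- ===== LEMMAS AND PROOFS =====

-- the dict always has the shape {2: a, 3: b, 4: c, 5: e}
def pvShape (a b c e : Int) : PySem.Dict Int Int :=
  PySem.Dict.ofList [(2, a), (3, b), (4, c), (5, e)]

-- number of all-same windows of width n in s (what A counts for one word and one n)
def pvCnt (n : Nat) (s : List Char) : Nat :=
  (List.range (s.length + 1 - n)).countP (fun k => pvAllSame ((s.drop k).take n))

theorem pvShape_values (a b c e : Int) : (pvShape a b c e).values.sum = a + b + c + e := by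
  show (a + (b + (c + (e + 0)))) = _; ring

theorem pvShape_modify2 (a b c e : Int) :
    (pvShape a b c e).modify 2 0 (· + 1) = pvShape (a+1) b c e := rfl
theorem pvShape_modify3 (a b c e : Int) :
    (pvShape a b c e).modify 3 0 (· + 1) = pvShape a (b+1) c e := rfl
theorem pvShape_modify4 (a b c e : Int) :
    (pvShape a b c e).modify 4 0 (· + 1) = pvShape a b (c+1) e := rfl
theorem pvShape_modify5 (a b c e : Int) :
    (pvShape a b c e).modify 5 0 (· + 1) = pvShape a b c (e+1) := rfl

-- A's innermost loop: a counting fold over any index list keeps the shape and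
-- bumps the tracked sum by the number of indices passing the test
theorem pvInner_shape (p : Int → Bool) (l : List Int) (n : Int)
    (hn : n = 2 ∨ n = 3 ∨ n = 4 ∨ n = 5) (a b c e : Int) :
    ∃ a' b' c' e',
      l.foldl (fun rep i => if p i then rep.modify n 0 (· + 1) else rep) (pvShape a b c e)
        = pvShape a' b' c' e' ∧ a' + b' + c' + e' = a + b + c + e + (l.countP p : Int) := by
  induction l generalizing a b c e with
  | nil => exact ⟨a, b, c, e, rfl, by simp⟩
  | cons hd tl ih =>
    by_cases hp : p hd
    · rcases hn with h | h | h | h <;> subst h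
      · obtain ⟨a', b', c', e', h1, h2⟩ := ih (a+1) b c e
        exact ⟨a', b', c', e', by simpa [hp, pvShape_modify2] using h1,
          by simp [hp] at h2 ⊢; omega⟩
      · obtain ⟨a', b', c', e', h1, h2⟩ := ih a (b+1) c e
        exact ⟨a', b', c', e', by simpa [hp, pvShape_modify3] using h1,
          by simp [hp] at h2 ⊢; omega⟩
      · obtain ⟨a', b', c', e', h1, h2⟩ := ih a b (c+1) e
        exact ⟨a', b', c', e', by simpa [hp, pvShape_modify4] using h1,
          by simp [hp] at h2 ⊢; omega⟩
      · obtain ⟨a', b', c', e', h1, h2⟩ := ih a b c (e+1)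
        exact ⟨a', b', c', e', by simpa [hp, pvShape_modify5] using h1,
          by simp [hp] at h2 ⊢; omega⟩
    · obtain ⟨a', b', c', e', h1, h2⟩ := ih a b c e
      exact ⟨a', b', c', e', by simpa [hp] using h1,
        by simp [hp] at h2 ⊢; omega⟩

-- bridge: A's pyRange/slice count for width n is pvCnt n
theorem pvCount_bridge (word : String) (n : Nat) :
    (PySem.List.pyRange 0 (PySem.Str.len word - (n : Int) + 1) 1).countP
        (fun i => pvAllSame (PySem.List.slice word.toList (some i) (some (i + (n : Int)))))
      = pvCnt n word.toList := by
  rw [PySem.List.pyRange_one, List.countP_map]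
  have hlen : PySem.Str.len word = (word.toList.length : Int) := by simp
  rw [hlen]
  have htn : ((word.toList.length : Int) - n + 1 - 0).toNat = word.toList.length + 1 - n := by
    omega
  rw [htn]
  unfold pvCnt
  apply List.countP_congr
  intro k _
  simp only [Function.comp_def, zero_add, PySem.List.slice_natCast_add]

theorem pvAllSame_cons (c : Char) (w : List Char) :
    pvAllSame (c :: w) = w.all (fun x => x == c) := by
  unfold pvAllSame
  have h : PySem.List.pyGet? (c :: w) 0 = some c := by
    simp [PySem.List.pyGet?, PySem.List.pyIdx?]
  rw [h]
  simp [List.all_cons, Bool.beq_comm]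

theorem pvAllSame_replicate (n : Nat) (c : Char) : pvAllSame (List.replicate n c) = true := by
  cases n with
  | zero => rfl
  | succ m => simp [List.replicate_succ, pvAllSame_cons]

theorem pvAllSame_false (c d : Char) (w : List Char) (h : d ∈ w) (hne : d ≠ c) :
    pvAllSame (c :: w) = false := by
  rw [pvAllSame_cons]
  apply Bool.eq_false_iff.mpr
  intro hall
  rw [List.all_eq_true] at hall
  exact hne (by simpa using hall d h)

-- head recursion for pvCnt
theorem pvCnt_cons (n : Nat) (c : Char) (s : List Char) :
    pvCnt n (c :: s)
      = (if n ≤ s.length + 1 ∧ pvAllSame ((c :: s).take n) then 1 else 0) + pvCnt n s := by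
  unfold pvCnt
  by_cases h : n ≤ s.length + 1
  · have hl : (c :: s).length + 1 - n = (s.length + 1 - n) + 1 := by
      simp [List.length_cons]; omega
    rw [hl, List.range_succ_eq_map, List.countP_cons, List.countP_map]
    have hp : ∀ k, ((c :: s).drop (k + 1)).take n = (s.drop k).take n := by
      intro k; rfl
    simp only [Function.comp_def, hp, List.drop_zero]
    simp only [h, true_and]
    exact Nat.add_comm _ _
  · rw [show (c :: s).length + 1 - n = 0 by simp; omega,
        show s.length + 1 - n = 0 by omega]
    simp [h]

-- one maximal run of length r contributes r + 1 - n windows of width n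
theorem pvCnt_run (n : Nat) (hn : 2 ≤ n) (c : Char) (u : List Char)
    (hu : ∀ d, u.head? = some d → d ≠ c) (r : Nat) :
    pvCnt n (List.replicate r c ++ u) = (r + 1 - n) + pvCnt n u := by
  induction r with
  | zero => simp; omega
  | succ r ih =>
    have hrep : List.replicate (r + 1) c ++ u = c :: (List.replicate r c ++ u) := by
      simp [List.replicate_succ]
    rw [hrep, pvCnt_cons, ih]
    have hind : (if n ≤ (List.replicate r c ++ u).length + 1 ∧
        pvAllSame ((c :: (List.replicate r c ++ u)).take n) then 1 else 0)
        = if n ≤ r + 1 then 1 else 0 := by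
      by_cases hc : n ≤ r + 1
      · rw [if_pos hc, if_pos]
        constructor
        · simp; omega
        · have : (c :: (List.replicate r c ++ u)).take n = List.replicate n c := by
            have : c :: (List.replicate r c ++ u) = List.replicate (r + 1) c ++ u := hrep.symm
            rw [this, List.take_append]
            have h0 : n - (List.replicate (r + 1) c).length = 0 := by simp; omega
            rw [h0, List.take_zero, List.append_nil, List.take_replicate]
            congr 1; omega
          rw [this]; exact pvAllSame_replicate n c
      · rw [if_neg hc, if_neg]
        rintro ⟨hle, hall⟩
        have hul : 1 ≤ u.length := by simp at hle; omega
        obtain ⟨d, u', rfl⟩ : ∃ d u', u = d :: u' := by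
          cases u with
          | nil => simp at hul
          | cons d u' => exact ⟨d, u', rfl⟩
        have hd : d ≠ c := hu d rfl
        have hmem : d ∈ (List.replicate r c ++ d :: u').take (n - 1) := by
          rw [List.take_append]
          apply List.mem_append_right
          simp only [List.length_replicate]
          obtain ⟨m, hm⟩ : ∃ m, n - 1 - r = m + 1 := ⟨n - 2 - r, by omega⟩
          rw [hm, List.take_succ_cons]
          exact List.mem_cons_self ..
        have ht : (c :: (List.replicate r c ++ d :: u')).take n
            = c :: (List.replicate r c ++ d :: u').take (n - 1) := by
          obtain ⟨m, hm⟩ : ∃ m, n = m + 1 := ⟨n - 1, by omega⟩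
          subst hm; simp [List.take_succ_cons]
        rw [ht, pvAllSame_false c d _ hmem hd] at hall
        exact Bool.false_ne_true hall
    rw [hind]
    by_cases hc : n ≤ r + 1 <;> simp [hc] <;> omega

theorem pvHead_dropWhile (p : Char → Bool) (l : List Char) (d : Char)
    (h : (l.dropWhile p).head? = some d) : p d = false := by
  induction l with
  | nil => simp [List.dropWhile] at h
  | cons x xs ih =>
    rw [List.dropWhile_cons] at h
    by_cases hx : p x
    · exact ih (by simpa [hx] using h)
    · simp [hx] at h; subst h; exact Bool.eq_false_iff.mpr hx

-- per-word equality: the four window counts sum to the run-length total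
theorem pvWord_eq (s : List Char) :
    ((pvCnt 2 s : Int) + pvCnt 3 s + pvCnt 4 s + pvCnt 5 s) = pvRunSum s := by
  have key : ∀ N s : List Char, s.length ≤ N.length →
      ((pvCnt 2 s : Int) + pvCnt 3 s + pvCnt 4 s + pvCnt 5 s) = pvRunSum s := by
    intro N
    induction N with
    | nil =>
      intro s hs
      rw [List.length_eq_zero_iff.mp (Nat.le_zero.mp hs)]
      simp [pvCnt, pvRunSum]
    | cons _ M ih =>
      intro s hs
      cases s with
      | nil => simp [pvCnt, pvRunSum]
      | cons c rest =>
        set t := rest.takeWhile (· == c) with ht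
        set u := rest.dropWhile (· == c) with hu'
        have htr : t = List.replicate t.length c := by
          rw [List.eq_replicate_iff]
          exact ⟨rfl, fun x hx => by
            have := List.mem_takeWhile_imp hx
            exact eq_of_beq this⟩
        have hsplit : c :: rest = List.replicate (t.length + 1) c ++ u := by
          conv_lhs => rw [← List.takeWhile_append_dropWhile (p := (· == c)) (l := rest),
            ← ht, ← hu']
          rw [List.replicate_succ, ← htr]
          rfl
        have hu : ∀ d, u.head? = some d → d ≠ c := by
          intro d hd
          have := pvHead_dropWhile (· == c) rest d (hu' ▸ hd)
          intro hdc
          rw [hdc] at this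
          simp at this
        have hulen : u.length ≤ M.length := by
          have h1 : u.length ≤ rest.length := by rw [hu']; exact List.length_dropWhile_le (· == c) rest
          have h2 : rest.length ≤ M.length := by simpa using hs
          omega
        have ihu := ih u hulen
        rw [hsplit]
        rw [pvCnt_run 2 (by norm_num) c u hu, pvCnt_run 3 (by norm_num) c u hu,
            pvCnt_run 4 (by norm_num) c u hu, pvCnt_run 5 (by norm_num) c u hu]
        rw [← hsplit]
        rw [show pvRunSum (c :: rest)
            = pvRunContrib (1 + (rest.takeWhile (· == c)).length)
              + pvRunSum (rest.dropWhile (· == c)) from by rw [pvRunSum]]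
        rw [← ht, ← hu', ← ihu]
        simp only [pvRunContrib, List.foldl_cons, List.foldl_nil]
        push_cast
        split_ifs <;> omega
  exact key s s le_rfl

theorem pvFoldl_shift (l : List String) (t : Int) :
    l.foldl (fun t w => t + pvRunSum w.toList) t
      = t + l.foldl (fun t w => t + pvRunSum w.toList) 0 := by
  induction l generalizing t with
  | nil => simp
  | cons w ws ih => rw [List.foldl_cons, List.foldl_cons, ih, ih (0 + pvRunSum w.toList)]; ring

-- A's loop body for one word (definitionally the lambda in char_repeat_py)
def pvStepWord (rep : PySem.Dict Int Int) (word : String) : PySem.Dict Int Int :=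
  ([2, 3, 4, 5] : List Int).foldl (fun rep n =>
    (PySem.List.pyRange 0 (PySem.Str.len word - n + 1) 1).foldl (fun rep i =>
      if pvAllSame (PySem.List.slice word.toList (some i) (some (i + n))) then
        rep.modify n 0 (· + 1)
      else rep) rep) rep

-- A's middle loop over (2, 3, 4, 5)
theorem pvMiddle (word : String) (a b c e : Int) :
    ∃ a' b' c' e',
      pvStepWord (pvShape a b c e) word = pvShape a' b' c' e'
      ∧ a' + b' + c' + e' = a + b + c + e + pvRunSum word.toList := by
  unfold pvStepWord
  simp only [List.foldl_cons, List.foldl_nil]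
  obtain ⟨a1, b1, c1, e1, H1, S1⟩ := pvInner_shape
    (fun i => pvAllSame (PySem.List.slice word.toList (some i) (some (i + (2:Int)))))
    (PySem.List.pyRange 0 (PySem.Str.len word - 2 + 1) 1) 2 (by norm_num) a b c e
  rw [H1]
  obtain ⟨a2, b2, c2, e2, H2, S2⟩ := pvInner_shape
    (fun i => pvAllSame (PySem.List.slice word.toList (some i) (some (i + (3:Int)))))
    (PySem.List.pyRange 0 (PySem.Str.len word - 3 + 1) 1) 3 (by norm_num) a1 b1 c1 e1
  rw [H2]
  obtain ⟨a3, b3, c3, e3, H3, S3⟩ := pvInner_shape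
    (fun i => pvAllSame (PySem.List.slice word.toList (some i) (some (i + (4:Int)))))
    (PySem.List.pyRange 0 (PySem.Str.len word - 4 + 1) 1) 4 (by norm_num) a2 b2 c2 e2
  rw [H3]
  obtain ⟨a4, b4, c4, e4, H4, S4⟩ := pvInner_shape
    (fun i => pvAllSame (PySem.List.slice word.toList (some i) (some (i + (5:Int)))))
    (PySem.List.pyRange 0 (PySem.Str.len word - 5 + 1) 1) 5 (by norm_num) a3 b3 c3 e3
  rw [H4]
  refine ⟨a4, b4, c4, e4, rfl, ?_⟩
  have hb2 := pvCount_bridge word 2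
  have hb3 := pvCount_bridge word 3
  have hb4 := pvCount_bridge word 4
  have hb5 := pvCount_bridge word 5
  simp only [Nat.cast_ofNat] at hb2 hb3 hb4 hb5
  rw [hb2] at S1; rw [hb3] at S2; rw [hb4] at S3; rw [hb5] at S4
  have hw := pvWord_eq word.toList
  omega

theorem pvOuter (words : List String) (a b c e : Int) :
    (words.foldl pvStepWord (pvShape a b c e)).values.sum
      = a + b + c + e + words.foldl (fun total word => total + pvRunSum word.toList) 0 := by
  induction words generalizing a b c e with
  | nil => simp [pvShape_values]
  | cons w ws ih =>
    rw [List.foldl_cons, List.foldl_cons]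
    obtain ⟨a', b', c', e', H, S⟩ := pvMiddle w a b c e
    rw [H, ih, pvFoldl_shift ws (0 + pvRunSum w.toList)]
    omega

-- ===== VERDICT (by name: the statement is the Claim_ definition above) =====
theorem char_repeat_py_spec : Claim_equal_char_repeat_py := by
  intro words _
  show char_repeat_py words = char_repeat_py_alt words
  have h0 : (PySem.Dict.ofList [((2:Int), (0:Int)), (3, 0), (4, 0), (5, 0)]) = pvShape 0 0 0 0 := rfl
  calc char_repeat_py words
      = 0 + 0 + 0 + 0 + words.foldl (fun total word => total + pvRunSum word.toList) 0 := by
        unfold char_repeat_py; rw [h0]; exact pvOuter words 0 0 0 0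
    _ = char_repeat_py_alt words := by unfold char_repeat_py_alt; ring
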